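-- pv_equiv track=rewrite | github.com/PierreMerveille/ProjetX | AI.py | defense_in_L
-- ===== SOURCE A (Python) =====
-- def defense_in_L (column_shift, row_shift, nb_cruiser, ally_hub, coord):
--     """Put the cruiser in the row and column wich we have to def/ it make a L
--     Parameters
--     ----------
--     column_shift : column than we have to def -1/1 left/right(int)
--     row_shift : row than we have to def -1/1 up/down(int)
--     nb_cruiser: the nbr of cruiser (int)
--     ally_hub : the coordinates of the ally hub (list)
--     coord : coord of the defensive line(list)
--
--     Versions
--     --------
--     specification : Johan Rochet (v.1 27/04/20)
--     implementation : Johan Rochet (v.1 28/04/20)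
--
--     """
--     nb_lines = 1
--     go_on = True
--     result = 0
--     add = 5
--     #Get the nbr of line than we have to make
--     while go_on  :
--         result += add
--
--         if result <nb_cruiser :
--             add+= 2
--             nb_lines += 1
--
--         else :
--             go_on = False
--
--     #Get the coord of each defensive place
--     for nb_line in range(1, nb_lines+1):
--         for x in range (-(column_shift), (nb_line+1) * column_shift, column_shift) :
--             if (ally_hub[0] + x , ally_hub[1] + row_shift * nb_line) not in coord :
--
--                 coord.append((ally_hub[0] + x, ally_hub[1] + row_shift * nb_line))
--
--         for y in range(-row_shift, (nb_line+1)*row_shift, row_shift) :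
--             if (ally_hub[0] + column_shift * nb_line, ally_hub[1] + y) not in coord :
--
--                 coord.append((ally_hub[0] + column_shift * nb_line, ally_hub[1] + y))
--     return coord
-- ===== SOURCE B (Python) =====
-- def defense_in_L(column_shift, row_shift, nb_cruiser, ally_hub, coord):
--     # nb_lines = smallest m >= 1 with m*m + 4*m >= nb_cruiser, found by
--     # exponential doubling + binary search instead of A's linear accumulation.
--     hi = 1
--     while hi * hi + 4 * hi < nb_cruiser:
--         hi *= 2
--     lo = 1
--     while lo < hi:
--         mid = (lo + hi) // 2
--         if mid * mid + 4 * mid < nb_cruiser: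
--             lo = mid + 1
--         else:
--             hi = mid
--     nb_lines = lo
--     ax, ay = ally_hub[0], ally_hub[1]
--     seen = set(coord)  # O(1) dedup instead of scanning the list each append
--     for n in range(1, nb_lines + 1):
--         for k in range(-1, n + 1):
--             p = (ax + k * column_shift, ay + row_shift * n)
--             if p not in seen:
--                 coord.append(p)
--                 seen.add(p)
--         for k in range(-1, n + 1):
--             p = (ax + column_shift * n, ay + k * row_shift)
--             if p not in seen:
--                 coord.append(p)
--                 seen.add(p)
--     return coord
-- ===== Notes on version B (the rewrite author's own statement) =====
-- stated objective: faster
-- what changed: nb_lines is found by exponential doubling plus binary search on m*m+4*m >= nb_cruiser instead of A's linear accumulate-until-threshold loop, and the coordinate loops dedup through a set built once (plain index ranges) instead of scanning the growing coord list on every append.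
import Mathlib
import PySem

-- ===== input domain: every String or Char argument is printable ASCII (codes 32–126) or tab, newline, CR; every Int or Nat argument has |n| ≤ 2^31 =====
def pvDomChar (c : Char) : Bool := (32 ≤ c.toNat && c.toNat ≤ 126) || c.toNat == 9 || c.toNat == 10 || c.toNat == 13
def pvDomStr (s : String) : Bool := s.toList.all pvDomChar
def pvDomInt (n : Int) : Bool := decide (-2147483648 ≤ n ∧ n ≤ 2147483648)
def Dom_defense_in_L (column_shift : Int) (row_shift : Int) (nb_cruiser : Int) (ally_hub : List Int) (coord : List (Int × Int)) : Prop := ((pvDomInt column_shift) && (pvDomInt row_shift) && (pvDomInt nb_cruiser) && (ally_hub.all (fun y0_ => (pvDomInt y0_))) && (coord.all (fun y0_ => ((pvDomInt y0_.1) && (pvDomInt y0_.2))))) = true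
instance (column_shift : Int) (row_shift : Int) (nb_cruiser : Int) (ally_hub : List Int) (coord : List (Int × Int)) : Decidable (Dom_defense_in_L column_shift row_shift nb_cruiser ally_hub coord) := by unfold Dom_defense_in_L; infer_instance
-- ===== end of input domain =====

-- B finds nb_lines by doubling + binary search instead of A's linear accumulation and dedups
-- appends through a set built once instead of rescanning coord; both Pythons also append to
-- `coord` in place identically — the theorems here are about the return value.

-- ===== PORT A =====
-- A's while loop; after k completed iterations add = 5 + 2*k and nb_lines = 1 + k,
-- so the loop state (nb_lines, result, add) is carried as (k, result).
def pvCountLoop (nb_cruiser : Int) (k : Nat) (result : Int) : Int :=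
  if result + (5 + 2 * (k : Int)) < nb_cruiser then
    pvCountLoop nb_cruiser (k + 1) (result + (5 + 2 * (k : Int)))
  else
    1 + (k : Int)
termination_by (nb_cruiser - result).toNat
decreasing_by omega

def defense_in_L (column_shift : Int) (row_shift : Int) (nb_cruiser : Int) (ally_hub : List Int) (coord : List (Int × Int)) : List (Int × Int) :=
  let nb_lines := pvCountLoop nb_cruiser 0 0
  (PySem.List.pyRange 1 (nb_lines + 1) 1).foldl (fun coord nb_line =>
    let coord := (PySem.List.pyRange (-column_shift) ((nb_line + 1) * column_shift) column_shift).foldl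
      (fun coord x =>
        if (PySem.List.pyGetD ally_hub 0 0 + x, PySem.List.pyGetD ally_hub 1 0 + row_shift * nb_line) ∈ coord then
          coord
        else
          coord ++ [(PySem.List.pyGetD ally_hub 0 0 + x, PySem.List.pyGetD ally_hub 1 0 + row_shift * nb_line)]) coord
    (PySem.List.pyRange (-row_shift) ((nb_line + 1) * row_shift) row_shift).foldl
      (fun coord y =>
        if (PySem.List.pyGetD ally_hub 0 0 + column_shift * nb_line, PySem.List.pyGetD ally_hub 1 0 + y) ∈ coord then
          coord
        else
          coord ++ [(PySem.List.pyGetD ally_hub 0 0 + column_shift * nb_line, PySem.List.pyGetD ally_hub 1 0 + y)]) coord) coord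

-- ===== PORT B =====
-- `while hi*hi + 4*hi < nb_cruiser: hi *= 2`, carrying hi = 2^k
def pvHiLoop (nb_cruiser : Int) (k : Nat) : Int :=
  if (2 : Int) ^ k * 2 ^ k + 4 * 2 ^ k < nb_cruiser then
    pvHiLoop nb_cruiser (k + 1)
  else
    (2 : Int) ^ k
termination_by (nb_cruiser - 2 ^ k).toNat
decreasing_by
  have h1 : (0 : Int) < 2 ^ k := by positivity
  have h3 : (0 : Int) ≤ 2 ^ k * 2 ^ k := by positivity
  omega

-- `while lo < hi: mid = (lo+hi)//2; ...`
def pvBS (nb_cruiser : Int) (lo : Int) (hi : Int) : Int :=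
  if h : lo < hi then
    let mid := PySem.Int.floordiv (lo + hi) 2
    if mid * mid + 4 * mid < nb_cruiser then pvBS nb_cruiser (mid + 1) hi
    else pvBS nb_cruiser lo mid
  else lo
termination_by (hi - lo).toNat
decreasing_by
  all_goals
    have hm : PySem.Int.floordiv (lo + hi) 2 = (lo + hi) / 2 :=
      PySem.Int.floordiv_eq_ediv_of_pos (by norm_num)
    omega

def defense_in_L_alt (column_shift : Int) (row_shift : Int) (nb_cruiser : Int) (ally_hub : List Int) (coord : List (Int × Int)) : List (Int × Int) :=
  let hi := pvHiLoop nb_cruiser 0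
  let nb_lines := pvBS nb_cruiser 1 hi
  let ax := PySem.List.pyGetD ally_hub 0 0
  let ay := PySem.List.pyGetD ally_hub 1 0
  let res := (PySem.List.pyRange 1 (nb_lines + 1) 1).foldl (fun cs n =>
    let cs := (PySem.List.pyRange (-1) (n + 1) 1).foldl (fun cs k =>
      if (ax + k * column_shift, ay + row_shift * n) ∈ cs.2 then cs
      else (cs.1 ++ [(ax + k * column_shift, ay + row_shift * n)],
            PySem.Set.add cs.2 (ax + k * column_shift, ay + row_shift * n))) cs
    (PySem.List.pyRange (-1) (n + 1) 1).foldl (fun cs k =>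
      if (ax + column_shift * n, ay + k * row_shift) ∈ cs.2 then cs
      else (cs.1 ++ [(ax + column_shift * n, ay + k * row_shift)],
            PySem.Set.add cs.2 (ax + column_shift * n, ay + k * row_shift))) cs)
    (coord, PySem.Set.ofList coord)
  res.1

-- ===== PRECONDITION & SPEC =====
-- A raises ValueError (range() with step 0) when either shift is 0, and IndexError when
-- ally_hub has fewer than two entries; Pre_ excludes exactly those inputs.
def Pre_defense_in_L (column_shift : Int) (row_shift : Int) (nb_cruiser : Int) (ally_hub : List Int) (coord : List (Int × Int)) : Prop :=
  column_shift ≠ 0 ∧ row_shift ≠ 0 ∧ 2 ≤ ally_hub.length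
instance (column_shift : Int) (row_shift : Int) (nb_cruiser : Int) (ally_hub : List Int) (coord : List (Int × Int)) : Decidable (Pre_defense_in_L column_shift row_shift nb_cruiser ally_hub coord) := by unfold Pre_defense_in_L; infer_instance

def pvWitness_defense_in_L : Int × Int × Int × List Int × (List (Int × Int)) := (1, -1, 7, [3, 4], [(2, 3)])

def Spec_defense_in_L (column_shift : Int) (row_shift : Int) (nb_cruiser : Int) (ally_hub : List Int) (coord : List (Int × Int)) (out : List (Int × Int)) : Prop := out = defense_in_L_alt column_shift row_shift nb_cruiser ally_hub coord
instance (column_shift : Int) (row_shift : Int) (nb_cruiser : Int) (ally_hub : List Int) (coord : List (Int × Int)) (out : List (Int × Int)) : Decidable (Spec_defense_in_L column_shift row_shift nb_cruiser ally_hub coord out) := by unfold Spec_defense_in_L; infer_instance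

-- ===== CLAIM (what is proved, stated in full; the proofs are below) =====
def Claim_equal_defense_in_L : Prop := ∀ (column_shift : Int) (row_shift : Int) (nb_cruiser : Int) (ally_hub : List Int) (coord : List (Int × Int)), Dom_defense_in_L column_shift row_shift nb_cruiser ally_hub coord → Pre_defense_in_L column_shift row_shift nb_cruiser ally_hub coord → Spec_defense_in_L column_shift row_shift nb_cruiser ally_hub coord (defense_in_L column_shift row_shift nb_cruiser ally_hub coord)


-- ===== LEMMAS AND PROOFS =====

-- `m` is the least integer ≥ 1 with m*m + 4*m ≥ nb
def pvIsLeast (nb m : Int) : Prop :=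
  1 ≤ m ∧ nb ≤ m * m + 4 * m ∧ ∀ j : Int, 1 ≤ j → j < m → j * j + 4 * j < nb

lemma pvCountLoop_least (nb : Int) (k : Nat) (result : Int)
    (hres : result = (k : Int) * k + 4 * k)
    (hmin : ∀ j : Int, 1 ≤ j → j ≤ (k : Int) → j * j + 4 * j < nb) :
    pvIsLeast nb (pvCountLoop nb k result) := by
  fun_induction pvCountLoop nb k result with
  | case1 k result hlt ih =>
    apply ih
    · push_cast; nlinarith [hres]
    · intro j hj1 hj2
      rcases lt_or_eq_of_le hj2 with h | h
      · exact hmin j hj1 (by push_cast at h ⊢; omega)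
      · subst h; push_cast; nlinarith [hres, hlt]
  | case2 k result hlt =>
    refine ⟨by omega, by nlinarith [hres, hlt], ?_⟩
    intro j hj1 hj2
    exact hmin j hj1 (by omega)

lemma pvHiLoop_ub (nb : Int) (k : Nat) :
    1 ≤ pvHiLoop nb k ∧ nb ≤ pvHiLoop nb k * pvHiLoop nb k + 4 * pvHiLoop nb k := by
  fun_induction pvHiLoop nb k with
  | case1 k hlt ih => exact ih
  | case2 k hlt => exact ⟨one_le_pow₀ (by norm_num), by omega⟩

lemma pvBS_eq (nb m : Int) (hm : pvIsLeast nb m) :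
    ∀ lo hi : Int, 1 ≤ lo → lo ≤ m → m ≤ hi → pvBS nb lo hi = m := by
  intro lo hi h1 h2 h3
  fun_induction pvBS nb lo hi with
  | case1 lo hi hlt mid hcond ih =>
    apply ih
    · have := PySem.Int.floordiv_two_mid_bounds (le_of_lt hlt)
      omega
    · -- m > mid since mid fails the predicate and j*j+4*j is monotone on [1,∞)
      by_contra hle
      push_neg at hle
      have hmid1 : 1 ≤ mid := by
        have := PySem.Int.floordiv_two_mid_bounds (le_of_lt hlt)
        omega
      have : m * m + 4 * m ≤ mid * mid + 4 * mid := by nlinarith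
      have := hm.2.1
      omega
    · exact h3
  | case2 lo hi hlt mid hcond ih =>
    apply ih h1 h2
    -- m ≤ mid: otherwise minimality at mid contradicts hcond
    by_contra hle
    push_neg at hle
    have hmid1 : 1 ≤ mid := by
      have := PySem.Int.floordiv_two_mid_bounds (le_of_lt hlt)
      omega
    exact absurd (hm.2.2 mid hmid1 hle) (by omega)
  | case3 lo hi hlt => omega

lemma pv_nb_lines_eq (nb : Int) : pvCountLoop nb 0 0 = pvBS nb 1 (pvHiLoop nb 0) := by
  have hA : pvIsLeast nb (pvCountLoop nb 0 0) :=
    pvCountLoop_least nb 0 0 (by norm_num) (by intro j h1 h2; omega)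
  obtain ⟨hhi1, hhi2⟩ := pvHiLoop_ub nb 0
  have hle : pvCountLoop nb 0 0 ≤ pvHiLoop nb 0 := by
    by_contra hlt
    push_neg at hlt
    exact absurd (hA.2.2 _ hhi1 hlt) (by omega)
  exact (pvBS_eq nb _ hA 1 _ le_rfl hA.1 hle).symm

-- range(-c, b*c, c) lists k*c for k = -1 .. b-1 (any c ≠ 0)
lemma pvRange_step_mul (c b : Int) (hc : c ≠ 0) :
    PySem.List.pyRange (-c) (b * c) c = (PySem.List.pyRange (-1) b 1).map (fun k => k * c) := by
  rw [PySem.List.pyRange_one, List.map_map]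
  rcases lt_or_gt_of_ne hc with hneg | hpos
  · unfold PySem.List.pyRange
    rw [if_neg hc]
    have hstep : ¬ (0 : Int) < c := not_lt.mpr (le_of_lt hneg)
    rw [if_neg hstep]
    have hcount : (if b * c < -c then ((-c - b * c + -c - 1) / -c).toNat else 0) = (b - -1).toNat := by
      by_cases hb : -1 < b
      · have hlt : b * c < -c := by nlinarith
        rw [if_pos hlt]
        have he : -c - b * c + -c - 1 = (-c - 1) + (b + 1) * -c := by ring
        rw [he, Int.add_mul_ediv_right _ _ (by omega : -c ≠ 0),
            Int.ediv_eq_zero_of_lt (by omega) (by omega)]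
        omega
      · have hge : ¬ b * c < -c := by push_neg; nlinarith [not_lt.mp hb]
        rw [if_neg hge]
        omega
    rw [hcount]
    apply List.map_congr_left
    intro k _
    simp only [Function.comp]
    ring
  · rw [PySem.List.pyRange_of_pos _ _ hpos]
    have hcount : (if -c < b * c then ((b * c - -c + c - 1) / c).toNat else 0) = (b - -1).toNat := by
      by_cases hb : -1 < b
      · have hlt : -c < b * c := by nlinarith
        rw [if_pos hlt]
        have he : b * c - -c + c - 1 = (c - 1) + (b + 1) * c := by ring
        rw [he, Int.add_mul_ediv_right _ _ (by omega : c ≠ 0),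
            Int.ediv_eq_zero_of_lt (by omega) (by omega)]
        omega
      · have hge : ¬ -c < b * c := by push_neg; nlinarith [not_lt.mp hb]
        rw [if_neg hge]
        omega
    rw [hcount]
    apply List.map_congr_left
    intro k _
    simp only [Function.comp]
    ring

-- one conditional-append pass: (list, set) version vs list-membership version
lemma pvFoldPair (g : Int → Int × Int) (l : List Int) :
    ∀ (cs : List (Int × Int) × PySem.Set (Int × Int)), (∀ x, x ∈ cs.2 ↔ x ∈ cs.1) →
    (l.foldl (fun cs k =>
        if g k ∈ cs.2 then cs else (cs.1 ++ [g k], PySem.Set.add cs.2 (g k))) cs).1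
      = l.foldl (fun co k => if g k ∈ co then co else co ++ [g k]) cs.1
    ∧ ∀ x, x ∈ (l.foldl (fun cs k =>
        if g k ∈ cs.2 then cs else (cs.1 ++ [g k], PySem.Set.add cs.2 (g k))) cs).2
        ↔ x ∈ (l.foldl (fun cs k =>
        if g k ∈ cs.2 then cs else (cs.1 ++ [g k], PySem.Set.add cs.2 (g k))) cs).1 := by
  induction l with
  | nil => exact fun cs h => ⟨rfl, h⟩
  | cons a t ih =>
    intro cs h
    simp only [List.foldl_cons]
    by_cases hmem : g a ∈ cs.2
    · rw [if_pos hmem, if_pos ((h (g a)).mp hmem)]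
      exact ih cs h
    · rw [if_neg hmem, if_neg (fun hco => hmem ((h (g a)).mpr hco))]
      apply ih
      intro x
      simp only [PySem.Set.mem_add, List.mem_append, List.mem_singleton, h x]
-- the whole per-line double pass, carried over any list of line numbers
lemma pvOuter (c r ax ay : Int) (hc : c ≠ 0) (hr : r ≠ 0) (lines : List Int) :
    ∀ (cs : List (Int × Int) × PySem.Set (Int × Int)), (∀ x, x ∈ cs.2 ↔ x ∈ cs.1) →
    (lines.foldl (fun cs n =>
      let cs := (PySem.List.pyRange (-1) (n + 1) 1).foldl (fun cs k =>
        if (ax + k * c, ay + r * n) ∈ cs.2 then cs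
        else (cs.1 ++ [(ax + k * c, ay + r * n)], PySem.Set.add cs.2 (ax + k * c, ay + r * n))) cs
      (PySem.List.pyRange (-1) (n + 1) 1).foldl (fun cs k =>
        if (ax + c * n, ay + k * r) ∈ cs.2 then cs
        else (cs.1 ++ [(ax + c * n, ay + k * r)], PySem.Set.add cs.2 (ax + c * n, ay + k * r))) cs) cs).1
    = lines.foldl (fun coord nb_line =>
      let coord := (PySem.List.pyRange (-c) ((nb_line + 1) * c) c).foldl
        (fun coord x => if (ax + x, ay + r * nb_line) ∈ coord then coord
          else coord ++ [(ax + x, ay + r * nb_line)]) coord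
      (PySem.List.pyRange (-r) ((nb_line + 1) * r) r).foldl
        (fun coord y => if (ax + c * nb_line, ay + y) ∈ coord then coord
          else coord ++ [(ax + c * nb_line, ay + y)]) coord) cs.1 := by
  induction lines with
  | nil => exact fun cs _ => rfl
  | cons n t ih =>
    intro cs h
    simp only [List.foldl_cons]
    rw [pvRange_step_mul c (n + 1) hc, pvRange_step_mul r (n + 1) hr,
        List.foldl_map, List.foldl_map]
    obtain ⟨e1, i1⟩ := pvFoldPair (fun k => (ax + k * c, ay + r * n))
      (PySem.List.pyRange (-1) (n + 1) 1) cs h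
    obtain ⟨e2, i2⟩ := pvFoldPair (fun k => (ax + c * n, ay + k * r))
      (PySem.List.pyRange (-1) (n + 1) 1) _ i1
    rw [ih _ i2, e2, e1]

-- ===== VERDICT (by name: the statement is the Claim_ definition above) =====
theorem defense_in_L_spec : Claim_equal_defense_in_L := by
  intro c r nb ally coord _ hpre
  obtain ⟨hc, hr, _⟩ := hpre
  unfold Spec_defense_in_L defense_in_L defense_in_L_alt
  rw [pv_nb_lines_eq nb]
  exact (pvOuter c r (PySem.List.pyGetD ally 0 0) (PySem.List.pyGetD ally 1 0) hc hr
    (PySem.List.pyRange 1 (pvBS nb 1 (pvHiLoop nb 0) + 1) 1) (coord, PySem.Set.ofList coord)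
    (fun x => PySem.Set.mem_ofList coord x)).symm
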